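-- pv_equiv track=rewrite | github.com/bobbycyiii/coover | min_aut.py | wh2
-- ===== SOURCE A (Python) =====
-- def wh2(A, x, w) :
-- 	nw = ''
-- 	for y in w :
-- 		if y in A :
-- 			if y.swapcase() in A :
-- 				nw += x.swapcase() + y + x
-- 			else :
-- 				if y != x and y != x.swapcase() :
-- 					nw += y + x
-- 				else :
-- 					nw += y
-- 		elif y.swapcase() in A :
-- 			if y != x and y != x.swapcase() :
-- 				nw += x.swapcase() + y
-- 			else :
-- 				nw += y
-- 		else :
-- 			nw += y
-- 	return nw
-- ===== SOURCE B (Python) =====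
-- def wh2(A, x, w):
--     # Precompute each distinct letter's expansion once, then one join pass.
--     xs = x.swapcase()
--     def expand(y):
--         in_a = y in A
--         sw_in_a = y.swapcase() in A
--         if in_a and sw_in_a:
--             return xs + y + x
--         if y == x or y == xs:
--             return y
--         if in_a:
--             return y + x
--         if sw_in_a:
--             return xs + y
--         return y
--     table = {y: expand(y) for y in set(w)}
--     return ''.join(table[y] for y in w)
-- ===== Notes on version B (the rewrite author's own statement) =====
-- stated objective: idiomatic
-- what changed: B replaces A's per-occurrence branch cascade and string += accumulation with a precomputed dict mapping each distinct character to its expansion, then emits the result in a single ''.join pass over w.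
import Mathlib
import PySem

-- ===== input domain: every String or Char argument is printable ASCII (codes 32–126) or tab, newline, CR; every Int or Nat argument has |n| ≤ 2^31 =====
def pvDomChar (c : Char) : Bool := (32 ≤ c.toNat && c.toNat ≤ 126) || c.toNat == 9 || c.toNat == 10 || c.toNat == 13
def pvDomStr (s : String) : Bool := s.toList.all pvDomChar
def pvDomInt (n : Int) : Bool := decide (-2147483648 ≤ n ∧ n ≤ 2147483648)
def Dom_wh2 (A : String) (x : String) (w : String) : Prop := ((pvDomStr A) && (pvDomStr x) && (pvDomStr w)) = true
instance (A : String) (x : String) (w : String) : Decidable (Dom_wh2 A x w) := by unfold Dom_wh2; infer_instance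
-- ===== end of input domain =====

-- B precomputes each distinct letter's expansion once in a dict, then emits the result in one join pass
-- (idiomatic restructuring; same exact output as A's per-occurrence branch cascade).

-- shared helper: Python str.swapcase, exact on the ASCII domain
def pvSwapChar (c : Char) : Char :=
  if PySem.Chars.isupper c then PySem.Chars.lowerChar c
  else if PySem.Chars.islower c then PySem.Chars.upperChar c
  else c

def pvSwapStr (s : String) : String := String.ofList (s.toList.map pvSwapChar)

-- ===== PORT A =====
def wh2 (A : String) (x : String) (w : String) : String :=
  w.toList.foldl (fun nw y =>
    if A.toList.contains y then
      if A.toList.contains (pvSwapChar y) then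
        nw ++ pvSwapStr x ++ String.ofList [y] ++ x
      else
        if String.ofList [y] ≠ x ∧ String.ofList [y] ≠ pvSwapStr x then
          nw ++ (String.ofList [y] ++ x)
        else nw ++ String.ofList [y]
    else if A.toList.contains (pvSwapChar y) then
      if String.ofList [y] ≠ x ∧ String.ofList [y] ≠ pvSwapStr x then
        nw ++ (pvSwapStr x ++ String.ofList [y])
      else nw ++ String.ofList [y]
    else nw ++ String.ofList [y]) ""

-- ===== PORT B =====
-- B's expand(y): classify one character once
def pvExpand (A : String) (x : String) (y : Char) : String :=
  let xs := pvSwapStr x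
  let inA := A.toList.contains y
  let swInA := A.toList.contains (pvSwapChar y)
  if inA && swInA then xs ++ String.ofList [y] ++ x
  else if String.ofList [y] = x ∨ String.ofList [y] = xs then String.ofList [y]
  else if inA then String.ofList [y] ++ x
  else if swInA then xs ++ String.ofList [y]
  else String.ofList [y]

def wh2_alt (A : String) (x : String) (w : String) : String :=
  let table := (PySem.Set.ofList w.toList).foldl
    (fun d y => d.insert y (pvExpand A x y)) PySem.Dict.empty
  PySem.Str.join "" (w.toList.map (fun y => table.getD y ""))

-- ===== PRECONDITION & SPEC =====
def Spec_wh2 (A : String) (x : String) (w : String) (out : String) : Prop := out = wh2_alt A x w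
instance (A : String) (x : String) (w : String) (out : String) : Decidable (Spec_wh2 A x w out) := by unfold Spec_wh2; infer_instance

-- ===== CLAIM (what is proved, stated in full; the proofs are below) =====
def Claim_equal_wh2 : Prop := ∀ (A : String) (x : String) (w : String), Dom_wh2 A x w → Spec_wh2 A x w (wh2 A x w)

-- ===== LEMMAS AND PROOFS =====

-- the per-character branch cascade of A computes exactly B's expand(y)
theorem step_eq_expand (A x : String) (y : Char) :
    (if A.toList.contains y then
      if A.toList.contains (pvSwapChar y) then
        pvSwapStr x ++ String.ofList [y] ++ x
      else
        if String.ofList [y] ≠ x ∧ String.ofList [y] ≠ pvSwapStr x then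
          String.ofList [y] ++ x
        else String.ofList [y]
    else if A.toList.contains (pvSwapChar y) then
      if String.ofList [y] ≠ x ∧ String.ofList [y] ≠ pvSwapStr x then
        pvSwapStr x ++ String.ofList [y]
      else String.ofList [y]
    else String.ofList [y]) = pvExpand A x y := by
  unfold pvExpand
  simp only []
  split_ifs <;> simp_all

-- A's accumulator fold, characterised with a generalised accumulator
theorem wh2_foldl (A x : String) (l : List Char) (s : String) :
    (l.foldl (fun nw y =>
      if A.toList.contains y then
        if A.toList.contains (pvSwapChar y) then
          nw ++ pvSwapStr x ++ String.ofList [y] ++ x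
        else
          if String.ofList [y] ≠ x ∧ String.ofList [y] ≠ pvSwapStr x then
            nw ++ (String.ofList [y] ++ x)
          else nw ++ String.ofList [y]
      else if A.toList.contains (pvSwapChar y) then
        if String.ofList [y] ≠ x ∧ String.ofList [y] ≠ pvSwapStr x then
          nw ++ (pvSwapStr x ++ String.ofList [y])
        else nw ++ String.ofList [y]
      else nw ++ String.ofList [y]) s).toList
    = s.toList ++ l.flatMap (fun y => (pvExpand A x y).toList) := by
  induction l generalizing s with
  | nil => simp
  | cons c cs ih =>
    rw [List.foldl_cons, ih, List.flatMap_cons]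
    have h := step_eq_expand A x c
    split_ifs at h ⊢ <;> simp [← h]

-- the table built from the distinct characters stores expand(y) under every y it saw
theorem table_getD (f : Char → String) (l : List Char) (d0 : PySem.Dict Char String) (y : Char) :
    (l.foldl (fun d c => d.insert c (f c)) d0).getD y ""
    = if y ∈ l then f y else d0.getD y "" := by
  induction l generalizing d0 with
  | nil => simp
  | cons c cs ih =>
    rw [List.foldl_cons, ih]
    by_cases hcs : y ∈ cs <;> by_cases hyc : y = c <;>
      simp [hcs, hyc, PySem.Dict.getD_insert]

theorem flatten_intersperse_nil {α : Type} (l : List (List α)) :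
    (List.intersperse ([] : List α) l).flatten = l.flatten := by
  induction l with
  | nil => rfl
  | cons a t ih =>
    cases t with
    | nil => rfl
    | cons b t' => simpa using ih

theorem wh2_alt_toList (A x w : String) :
    (wh2_alt A x w).toList = w.toList.flatMap (fun y => (pvExpand A x y).toList) := by
  unfold wh2_alt
  rw [PySem.Str.toList_join]
  have hmap : (w.toList.map (fun y =>
      ((PySem.Set.ofList w.toList).foldl (fun d y => d.insert y (pvExpand A x y))
        PySem.Dict.empty).getD y ""))
      = w.toList.map (fun y => pvExpand A x y) := by
    apply List.map_congr_left
    intro y hy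
    rw [table_getD]
    simp [PySem.Set.mem_ofList, hy]
  rw [hmap]
  simp only [PySem.Chars.join, List.intercalate, List.flatMap]
  rw [show ("" : String).toList = ([] : List Char) from rfl, flatten_intersperse_nil,
    List.map_map]
  rfl

-- ===== VERDICT (by name: the statement is the Claim_ definition above) =====
theorem wh2_spec : Claim_equal_wh2 := by
  intro A x w _
  unfold Spec_wh2
  apply String.toList_injective
  rw [wh2_alt_toList]
  unfold wh2
  rw [wh2_foldl]
  simp
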